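-- pv_equiv track=rewrite | github.com/Ch-Adrian/Introduction_to_Computer_Science_Course | cw3/zad12.py | spa
-- ===== SOURCE A (Python) =====
-- end = None
--
-- def spa(t, N, czy_dod):
--     dl = 0
--     #if not czy_dod: t.reverse()
--
--     for i in range(N-1):
--         r = t[i+1] - t[i]
--         if not r: continue
--         if ((r<0) == czy_dod): continue
--         #if r<=0: continue
--         j = i
--         counter = 0
--         while j< N-1 and r == t[j+1] - t[j]:
--             counter += 1
--             if dl < counter:
--                 dl = counter
--             end
--             j += 1
--         end
--     end
--     #if not czy_dod: t.reverse()
--     return(dl + 1) # dl to ilość par o tej samej różnicy, jest ich o jeden mniej niż samych liczb w ciągu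
-- ===== SOURCE B (Python) =====
-- def spa(t, N, czy_dod):
--     best = 0
--     run = 0
--     prev = None
--     for k in range(N - 1):
--         d = t[k + 1] - t[k]
--         if prev is not None and d == prev:
--             run += 1
--         else:
--             run = 1
--             prev = d
--         if (d > 0 if czy_dod else d < 0) and run > best:
--             best = run
--     return best + 1
-- ===== Notes on version B (the rewrite author's own statement) =====
-- stated objective: alternative
-- what changed: Replaced A's rescan of the whole equal-difference run from every qualifying start index (nested while inside the for loop) by a single left-to-right pass that tracks the current equal-difference run length and the best run with the required sign.
import Mathlib
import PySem

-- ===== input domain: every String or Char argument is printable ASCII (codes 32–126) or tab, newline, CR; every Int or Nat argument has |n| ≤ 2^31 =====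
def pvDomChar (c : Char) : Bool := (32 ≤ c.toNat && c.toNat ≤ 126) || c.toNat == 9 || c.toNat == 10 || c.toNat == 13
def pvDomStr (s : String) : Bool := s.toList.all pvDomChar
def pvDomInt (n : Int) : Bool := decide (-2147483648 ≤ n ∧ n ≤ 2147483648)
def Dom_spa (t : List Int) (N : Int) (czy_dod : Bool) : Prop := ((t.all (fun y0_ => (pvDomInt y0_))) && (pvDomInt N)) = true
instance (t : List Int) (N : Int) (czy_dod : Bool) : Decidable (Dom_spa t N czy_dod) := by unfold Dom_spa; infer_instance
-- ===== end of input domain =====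

-- B replaces A's rescan from every qualifying start (inner while loop) by a single pass
-- tracking the current equal-difference run length; return value only, no mutation.

-- ===== PORT A =====
-- A's inner loop: 'while j < N-1 and r == t[j+1] - t[j]: counter += 1; if dl < counter: dl = counter; j += 1'
def spaWhile (t : List Int) (N r j counter dl : Int) : Int :=
  if h : j < N - 1 ∧ r = PySem.List.pyGetD t (j + 1) 0 - PySem.List.pyGetD t j 0 then
    spaWhile t N r (j + 1) (counter + 1) (if dl < counter + 1 then counter + 1 else dl)
  else dl
termination_by (N - 1 - j).toNat
decreasing_by omega

-- A's outer loop: 'for i in range(N-1): r = t[i+1]-t[i]; if not r: continue; if (r<0)==czy_dod: continue; …'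
-- (r is written out at each use)
def spa (t : List Int) (N : Int) (czy_dod : Bool) : Int :=
  (PySem.List.pyRange 0 (N - 1) 1).foldl (fun dl i =>
    if PySem.List.pyGetD t (i + 1) 0 - PySem.List.pyGetD t i 0 = 0 then dl
    else if decide (PySem.List.pyGetD t (i + 1) 0 - PySem.List.pyGetD t i 0 < 0) = czy_dod then dl
    else spaWhile t N (PySem.List.pyGetD t (i + 1) 0 - PySem.List.pyGetD t i 0) i 0 dl) 0 + 1

-- ===== PORT B =====
-- one pass, state s = (best, run, prev); 'd = t[k+1] - t[k]' is written out at each use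
def spa_alt (t : List Int) (N : Int) (czy_dod : Bool) : Int :=
  ((PySem.List.pyRange 0 (N - 1) 1).foldl (fun (s : Int × Int × Option Int) k =>
    (if (if czy_dod then decide (0 < (PySem.List.pyGetD t (k + 1) 0 - PySem.List.pyGetD t k 0)) else decide ((PySem.List.pyGetD t (k + 1) 0 - PySem.List.pyGetD t k 0) < 0)) = true ∧ (if s.2.2 = some (PySem.List.pyGetD t (k + 1) 0 - PySem.List.pyGetD t k 0) then s.2.1 + 1 else 1) > s.1 then (if s.2.2 = some (PySem.List.pyGetD t (k + 1) 0 - PySem.List.pyGetD t k 0) then s.2.1 + 1 else 1) else s.1,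
     (if s.2.2 = some (PySem.List.pyGetD t (k + 1) 0 - PySem.List.pyGetD t k 0) then s.2.1 + 1 else 1),
     some (PySem.List.pyGetD t (k + 1) 0 - PySem.List.pyGetD t k 0))) ((0 : Int), (0 : Int), (none : Option Int))).1 + 1

-- ===== PRECONDITION & SPEC =====
-- Python A raises IndexError exactly when 2 ≤ N and N > len(t); those inputs are excluded.
def Pre_spa (t : List Int) (N : Int) (czy_dod : Bool) : Prop := N ≤ (t.length : Int) ∨ N ≤ 1
instance (t : List Int) (N : Int) (czy_dod : Bool) : Decidable (Pre_spa t N czy_dod) := by unfold Pre_spa; infer_instance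
def pvWitness_spa : List Int × Int × Bool := ([1, 2, 3, 2, 1], 5, true)

def Spec_spa (t : List Int) (N : Int) (czy_dod : Bool) (out : Int) : Prop := out = spa_alt t N czy_dod
instance (t : List Int) (N : Int) (czy_dod : Bool) (out : Int) : Decidable (Spec_spa t N czy_dod out) := by unfold Spec_spa; infer_instance

-- ===== CLAIM (what is proved, stated in full; the proofs are below) =====
def Claim_equal_spa : Prop := ∀ (t : List Int) (N : Int) (czy_dod : Bool), Dom_spa t N czy_dod → Pre_spa t N czy_dod → Spec_spa t N czy_dod (spa t N czy_dod)

-- ===== LEMMAS AND PROOFS =====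

-- the i-th consecutive difference
def dfun (t : List Int) (i : Int) : Int := PySem.List.pyGetD t (i + 1) 0 - PySem.List.pyGetD t i 0
-- the list of differences for indices j … N-2
def dsuf (t : List Int) (N j : Int) : List Int := (PySem.List.pyRange j (N - 1) 1).map (dfun t)
-- the sign test both programs apply
def goodB (czy : Bool) (d : Int) : Bool := if czy then decide (0 < d) else decide (d < 0)

-- length of the leading run of entries equal to r
def frun (r : Int) : List Int → Int
  | [] => 0
  | x :: xs => if x = r then 1 + frun r xs else 0

-- max over all good start positions of the forward equal run (A's quantity)
def Amax (czy : Bool) : List Int → Int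
  | [] => 0
  | x :: xs => if goodB czy x = true then max (1 + frun x xs) (Amax czy xs) else Amax czy xs

-- B's scan written with max instead of a threaded accumulator
def Mfun (czy : Bool) : Option Int → Int → List Int → Int
  | _, _, [] => 0
  | prev, run, x :: xs =>
    if goodB czy x = true then
      max (if prev = some x then run + 1 else 1)
        (Mfun czy (some x) (if prev = some x then run + 1 else 1) xs)
    else Mfun czy (some x) (if prev = some x then run + 1 else 1) xs

theorem frun_nonneg (r : Int) (xs : List Int) : 0 ≤ frun r xs := by
  induction xs with
  | nil => simp [frun]
  | cons x xs ih => simp only [frun]; split <;> omega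

theorem Amax_nonneg (czy : Bool) (xs : List Int) : 0 ≤ Amax czy xs := by
  induction xs with
  | nil => simp [Amax]
  | cons x xs ih =>
    simp only [Amax]
    have := frun_nonneg x xs
    split <;> omega

theorem dsuf_nil (t : List Int) (N j : Int) (h : ¬ j < N - 1) : dsuf t N j = [] := by
  unfold dsuf
  rw [PySem.List.pyRange_one_eq_nil (by omega)]
  rfl

theorem dsuf_cons (t : List Int) (N j : Int) (h : j < N - 1) :
    dsuf t N j = dfun t j :: dsuf t N (j + 1) := by
  unfold dsuf
  rw [PySem.List.pyRange_one_cons h]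
  rfl

theorem spaWhileFuel (t : List Int) (N r : Int) : ∀ (m : Nat) (j c dl : Int),
    (N - 1 - j).toNat = m → 0 ≤ c → c ≤ dl →
    spaWhile t N r j c dl = max dl (c + frun r (dsuf t N j)) := by
  intro m
  induction m with
  | zero =>
    intro j c dl hmj hc hcd
    rw [spaWhile, dif_neg (fun hcond => absurd hcond.1 (by omega)),
      dsuf_nil t N j (by omega)]
    simp only [frun]
    omega
  | succ m ih =>
    intro j c dl hmj hc hcd
    by_cases hcond : j < N - 1 ∧ r = PySem.List.pyGetD t (j + 1) 0 - PySem.List.pyGetD t j 0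
    · rw [spaWhile, dif_pos hcond]
      have hif : (if dl < c + 1 then c + 1 else dl) = max dl (c + 1) := by split_ifs <;> omega
      rw [hif, ih (j + 1) (c + 1) (max dl (c + 1)) (by omega) (by omega) (by omega),
        dsuf_cons t N j hcond.1]
      have hr : dfun t j = r := by unfold dfun; omega
      rw [hr]
      simp only [frun, if_true]
      have := frun_nonneg r (dsuf t N (j + 1))
      omega
    · rw [spaWhile, dif_neg hcond]
      by_cases hj : j < N - 1
      · rw [dsuf_cons t N j hj]
        have hr : ¬ (dfun t j = r) := fun he => hcond ⟨hj, by unfold dfun at he; omega⟩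
        simp only [frun]
        rw [if_neg hr]
        omega
      · rw [dsuf_nil t N j hj]
        simp only [frun]
        omega

theorem spaWhile_eq (t : List Int) (N r j c dl : Int) (hc : 0 ≤ c) (hcd : c ≤ dl) :
    spaWhile t N r j c dl = max dl (c + frun r (dsuf t N j)) :=
  spaWhileFuel t N r (N - 1 - j).toNat j c dl rfl hc hcd

theorem AfoldFuel (t : List Int) (N : Int) (czy : Bool) : ∀ (m : Nat) (j dl : Int),
    (N - 1 - j).toNat = m → 0 ≤ dl →
    (PySem.List.pyRange j (N - 1) 1).foldl (fun dl i =>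
      if PySem.List.pyGetD t (i + 1) 0 - PySem.List.pyGetD t i 0 = 0 then dl
      else if decide (PySem.List.pyGetD t (i + 1) 0 - PySem.List.pyGetD t i 0 < 0) = czy then dl
      else spaWhile t N (PySem.List.pyGetD t (i + 1) 0 - PySem.List.pyGetD t i 0) i 0 dl) dl
      = max dl (Amax czy (dsuf t N j)) := by
  intro m
  induction m with
  | zero =>
    intro j dl hmj hdl
    rw [PySem.List.pyRange_one_eq_nil (by omega), dsuf_nil t N j (by omega)]
    simp only [List.foldl_nil, Amax]
    omega
  | succ m ih =>
    intro j dl hmj hdl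
    have hj : j < N - 1 := by omega
    rw [PySem.List.pyRange_one_cons hj, dsuf_cons t N j hj]
    simp only [List.foldl_cons]
    have hAr := Amax_nonneg czy (dsuf t N (j + 1))
    have hfr := frun_nonneg (PySem.List.pyGetD t (j + 1) 0 - PySem.List.pyGetD t j 0) (dsuf t N (j + 1))
    have hdd : dfun t j = PySem.List.pyGetD t (j + 1) 0 - PySem.List.pyGetD t j 0 := rfl
    rw [hdd]
    by_cases hg : goodB czy (PySem.List.pyGetD t (j + 1) 0 - PySem.List.pyGetD t j 0) = true
    · have h0 : ¬ (PySem.List.pyGetD t (j + 1) 0 - PySem.List.pyGetD t j 0 = 0) := by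
        unfold goodB at hg; cases czy <;> simp at hg <;> omega
      have h1 : ¬ (decide (PySem.List.pyGetD t (j + 1) 0 - PySem.List.pyGetD t j 0 < 0) = czy) := by
        unfold goodB at hg; cases czy <;> simp at hg ⊢ <;> omega
      rw [if_neg h0, if_neg h1]
      have hsw : spaWhile t N (PySem.List.pyGetD t (j + 1) 0 - PySem.List.pyGetD t j 0) j 0 dl
          = max dl (1 + frun (PySem.List.pyGetD t (j + 1) 0 - PySem.List.pyGetD t j 0) (dsuf t N (j + 1))) := by
        rw [spaWhile_eq t N _ j 0 dl le_rfl hdl, dsuf_cons t N j hj, hdd]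
        simp only [frun, if_true]
        omega
      rw [hsw, ih (j + 1)
        (max dl (1 + frun (PySem.List.pyGetD t (j + 1) 0 - PySem.List.pyGetD t j 0) (dsuf t N (j + 1))))
        (by omega) (by omega)]
      simp only [Amax]
      rw [if_pos hg]
      omega
    · have hstep : (if PySem.List.pyGetD t (j + 1) 0 - PySem.List.pyGetD t j 0 = 0 then dl
          else if decide (PySem.List.pyGetD t (j + 1) 0 - PySem.List.pyGetD t j 0 < 0) = czy then dl
          else spaWhile t N (PySem.List.pyGetD t (j + 1) 0 - PySem.List.pyGetD t j 0) j 0 dl) = dl := by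
        by_cases h0 : PySem.List.pyGetD t (j + 1) 0 - PySem.List.pyGetD t j 0 = 0
        · rw [if_pos h0]
        · rw [if_neg h0]
          have h1 : decide (PySem.List.pyGetD t (j + 1) 0 - PySem.List.pyGetD t j 0 < 0) = czy := by
            unfold goodB at hg; cases czy <;> simp at hg ⊢ <;> omega
          rw [if_pos h1]
      rw [hstep, ih (j + 1) dl (by omega) hdl]
      simp only [Amax]
      rw [if_neg hg]

theorem BfoldFuel (t : List Int) (N : Int) (czy : Bool) : ∀ (m : Nat) (j best run : Int) (prev : Option Int),
    (N - 1 - j).toNat = m → 0 ≤ best →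
    ((PySem.List.pyRange j (N - 1) 1).foldl (fun (s : Int × Int × Option Int) k =>
      (if (if czy then decide (0 < (PySem.List.pyGetD t (k + 1) 0 - PySem.List.pyGetD t k 0)) else decide ((PySem.List.pyGetD t (k + 1) 0 - PySem.List.pyGetD t k 0) < 0)) = true ∧ (if s.2.2 = some (PySem.List.pyGetD t (k + 1) 0 - PySem.List.pyGetD t k 0) then s.2.1 + 1 else 1) > s.1 then (if s.2.2 = some (PySem.List.pyGetD t (k + 1) 0 - PySem.List.pyGetD t k 0) then s.2.1 + 1 else 1) else s.1,
       (if s.2.2 = some (PySem.List.pyGetD t (k + 1) 0 - PySem.List.pyGetD t k 0) then s.2.1 + 1 else 1),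
       some (PySem.List.pyGetD t (k + 1) 0 - PySem.List.pyGetD t k 0))) (best, run, prev)).1
      = max best (Mfun czy prev run (dsuf t N j)) := by
  intro m
  induction m with
  | zero =>
    intro j best run prev hmj hb
    rw [PySem.List.pyRange_one_eq_nil (by omega), dsuf_nil t N j (by omega)]
    simp only [List.foldl_nil, Mfun]
    omega
  | succ m ih =>
    intro j best run prev hmj hb
    have hj : j < N - 1 := by omega
    rw [PySem.List.pyRange_one_cons hj, dsuf_cons t N j hj]
    simp only [List.foldl_cons]
    have hdd : dfun t j = PySem.List.pyGetD t (j + 1) 0 - PySem.List.pyGetD t j 0 := rfl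
    rw [hdd]
    rw [ih (j + 1)
      (if (if czy then decide (0 < (PySem.List.pyGetD t (j + 1) 0 - PySem.List.pyGetD t j 0)) else decide ((PySem.List.pyGetD t (j + 1) 0 - PySem.List.pyGetD t j 0) < 0)) = true ∧ (if prev = some (PySem.List.pyGetD t (j + 1) 0 - PySem.List.pyGetD t j 0) then run + 1 else 1) > best then (if prev = some (PySem.List.pyGetD t (j + 1) 0 - PySem.List.pyGetD t j 0) then run + 1 else 1) else best)
      (if prev = some (PySem.List.pyGetD t (j + 1) 0 - PySem.List.pyGetD t j 0) then run + 1 else 1)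
      (some (PySem.List.pyGetD t (j + 1) 0 - PySem.List.pyGetD t j 0))
      (by omega)
      (by
        by_cases hc1 : (if czy then decide (0 < (PySem.List.pyGetD t (j + 1) 0 - PySem.List.pyGetD t j 0)) else decide ((PySem.List.pyGetD t (j + 1) 0 - PySem.List.pyGetD t j 0) < 0)) = true ∧ (if prev = some (PySem.List.pyGetD t (j + 1) 0 - PySem.List.pyGetD t j 0) then run + 1 else 1) > best
        · rw [if_pos hc1]
          exact le_of_lt (lt_of_le_of_lt hb hc1.2)
        · rw [if_neg hc1]
          exact hb)]
    simp only [Mfun, goodB]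
    cases czy <;> simp <;> try split_ifs <;> omega

theorem Mfun_core (czy : Bool) : ∀ (xs : List Int) (p r : Int), 0 ≤ r →
    Mfun czy (some p) r xs
      = max (if goodB czy p = true ∧ 1 ≤ frun p xs then r + frun p xs else 0) (Amax czy xs) := by
  intro xs
  induction xs with
  | nil =>
    intro p r hr
    simp only [Mfun, frun, Amax]
    rw [if_neg (fun h => absurd h.2 (by norm_num))]
    simp
  | cons x xs ih =>
    intro p r hr
    have hA := Amax_nonneg czy xs
    have hf := frun_nonneg x xs
    have hfp := frun_nonneg p xs
    by_cases hxp : x = p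
    · subst hxp
      simp only [Mfun, frun, Amax]
      simp only [if_true]
      rw [ih x (r + 1) (by omega)]
      by_cases hg : goodB czy x = true
      · simp only [hg, true_and, if_true]
        try split_ifs <;> omega
        try omega
      · have hg' : goodB czy x = false := by revert hg; cases (goodB czy x) <;> simp
        simp [hg']
        try split_ifs <;> omega
        try omega
    · simp only [Mfun, frun, Amax]
      rw [show (if some p = some x then r + 1 else 1) = 1 from
        if_neg (fun h => hxp (Option.some.inj h).symm)]
      rw [show (if x = p then 1 + frun p xs else 0) = 0 from if_neg hxp]
      rw [ih x 1 (by norm_num)]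
      rw [show (if goodB czy p = true ∧ (1 : Int) ≤ 0 then r + 0 else 0) = 0 from
        if_neg (fun h => absurd h.2 (by norm_num))]
      by_cases hg : goodB czy x = true
      · simp only [hg, true_and, if_true]
        try split_ifs <;> omega
        try omega
      · have hg' : goodB czy x = false := by revert hg; cases (goodB czy x) <;> simp
        simp [hg']
        try split_ifs <;> omega
        try omega

theorem Mfun_none (czy : Bool) (xs : List Int) : Mfun czy none 0 xs = Amax czy xs := by
  cases xs with
  | nil => rfl
  | cons x xs =>
    have hA := Amax_nonneg czy xs
    have hf := frun_nonneg x xs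
    simp only [Mfun, Amax]
    rw [show (if (none : Option Int) = some x then (0 : Int) + 1 else 1) = 1 from if_neg (by simp)]
    rw [Mfun_core czy xs x 1 (by norm_num)]
    by_cases hg : goodB czy x = true
    · simp only [hg, true_and, if_true]
      try split_ifs <;> omega
      try omega
    · have hg' : goodB czy x = false := by revert hg; cases (goodB czy x) <;> simp
      simp [hg']
      try split_ifs <;> omega
      try omega

theorem spa_eq (t : List Int) (N : Int) (czy : Bool) :
    spa t N czy = Amax czy (dsuf t N 0) + 1 := by
  unfold spa
  rw [AfoldFuel t N czy (N - 1 - 0).toNat 0 0 rfl le_rfl]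
  have := Amax_nonneg czy (dsuf t N 0)
  omega

theorem spa_alt_eq (t : List Int) (N : Int) (czy : Bool) :
    spa_alt t N czy = Amax czy (dsuf t N 0) + 1 := by
  unfold spa_alt
  rw [BfoldFuel t N czy (N - 1 - 0).toNat 0 0 0 none rfl le_rfl]
  rw [Mfun_none]
  have := Amax_nonneg czy (dsuf t N 0)
  omega

-- ===== VERDICT (by name: the statement is the Claim_ definition above) =====
theorem spa_spec : Claim_equal_spa := by
  intro t N czy_dod _ _
  unfold Spec_spa
  rw [spa_eq, spa_alt_eq]
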